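-- pv_equiv track=rewrite | github.com/fangzhonglyu/gpu-layer-benchmark | add_p2p_energy.py | _replknet_transfer_bytes
-- ===== SOURCE A (Python) =====
-- DTYPE_BYTES = 2  # float16
--
-- def _replknet_transfer_bytes(batch):
--     outputs = [
--         batch * 128 * 56 * 56,   # layer01_s0b0_pw1
--         batch * 128 * 56 * 56,   # layer02_s0b0_lk31
--         batch * 128 * 56 * 56,   # layer03_s0b0_sk5
--         batch * 128 * 56 * 56,   # layer04_s0b0_pw2
--         batch * 512 * 56 * 56,   # layer05_s0b1_pw1
--         batch * 128 * 56 * 56,   # layer06_s0b1_pw2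
--         batch * 256 * 28 * 28,   # layer13_s1b0_pw1
--         batch * 256 * 28 * 28,   # layer14_s1b0_lk29
--         batch * 256 * 28 * 28,   # layer15_s1b0_sk5
--         batch * 256 * 28 * 28,   # layer16_s1b0_pw2
--         batch * 1024 * 28 * 28,  # layer17_s1b1_pw1
--         batch * 256 * 28 * 28,   # layer18_s1b1_pw2  (last layer)
--     ]
--     return sum(o * DTYPE_BYTES for o in outputs[:-1])
-- ===== SOURCE B (Python) =====
-- DTYPE_BYTES = 2  # float16
--
-- def _replknet_transfer_bytes(batch):
--     # Every summed layer is linear in batch: total = batch * fixed byte coefficient.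
--     # Stage 0 (56x56): five 128-channel tensors + one 512-channel tensor;
--     # stage 1 (28x28): four 256-channel tensors + one 1024-channel tensor
--     # (the final 256x28x28 layer is excluded, as in the original [:-1]).
--     stage0 = (5 * 128 + 512) * 56 * 56
--     stage1 = (4 * 256 + 1024) * 28 * 28
--     return batch * (stage0 + stage1) * DTYPE_BYTES
-- ===== Notes on version B (the rewrite author's own statement) =====
-- stated objective: simpler
-- what changed: B replaces the per-layer list, the slice that drops the last element and the generator sum with a closed form: batch times a grouped constant byte coefficient (per-stage channel sums times spatial size times DTYPE_BYTES).
import Mathlib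
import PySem

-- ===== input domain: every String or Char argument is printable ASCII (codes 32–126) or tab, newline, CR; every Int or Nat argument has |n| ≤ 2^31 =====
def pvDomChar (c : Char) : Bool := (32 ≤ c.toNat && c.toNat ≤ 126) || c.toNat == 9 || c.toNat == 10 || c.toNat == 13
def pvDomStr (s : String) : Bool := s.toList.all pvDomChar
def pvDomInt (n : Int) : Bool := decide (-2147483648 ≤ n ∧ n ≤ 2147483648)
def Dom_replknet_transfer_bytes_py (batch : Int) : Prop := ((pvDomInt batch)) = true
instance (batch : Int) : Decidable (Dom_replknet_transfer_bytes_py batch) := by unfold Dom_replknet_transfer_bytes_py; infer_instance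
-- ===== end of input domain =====

-- B replaces A's list/slice/sum with a closed form: batch times a grouped constant byte coefficient (simpler).


-- ===== PORT A =====
-- A: builds the 12-element outputs list, drops the last via [:-1], sums each * DTYPE_BYTES
def pvDTYPE_BYTES : Int := 2
def replknet_transfer_bytes_py (batch : Int) : Int :=
  let outputs : List Int := [
    batch * 128 * 56 * 56,
    batch * 128 * 56 * 56,
    batch * 128 * 56 * 56,
    batch * 128 * 56 * 56,
    batch * 512 * 56 * 56,
    batch * 128 * 56 * 56,
    batch * 256 * 28 * 28,
    batch * 256 * 28 * 28,
    batch * 256 * 28 * 28,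
    batch * 256 * 28 * 28,
    batch * 1024 * 28 * 28,
    batch * 256 * 28 * 28]
  ((PySem.List.slice outputs none (some (-1))).map (fun o => o * pvDTYPE_BYTES)).foldl (· + ·) 0

-- ===== PORT B =====
-- B: closed form — batch times a grouped constant byte coefficient
def replknet_transfer_bytes_py_alt (batch : Int) : Int :=
  let stage0 : Int := (5 * 128 + 512) * 56 * 56
  let stage1 : Int := (4 * 256 + 1024) * 28 * 28
  batch * (stage0 + stage1) * pvDTYPE_BYTES

-- ===== PRECONDITION & SPEC =====
def Spec_replknet_transfer_bytes_py (batch : Int) (out : Int) : Prop := out = replknet_transfer_bytes_py_alt batch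
instance (batch : Int) (out : Int) : Decidable (Spec_replknet_transfer_bytes_py batch out) := by unfold Spec_replknet_transfer_bytes_py; infer_instance

-- ===== CLAIM (what is proved, stated in full; the proofs are below) =====
def Claim_equal_replknet_transfer_bytes_py : Prop := ∀ (batch : Int), Dom_replknet_transfer_bytes_py batch → Spec_replknet_transfer_bytes_py batch (replknet_transfer_bytes_py batch)

-- ===== LEMMAS AND PROOFS =====

-- ===== VERDICT (by name: the statement is the Claim_ definition above) =====
theorem replknet_transfer_bytes_py_spec : Claim_equal_replknet_transfer_bytes_py := by
  intro batch _
  unfold Spec_replknet_transfer_bytes_py replknet_transfer_bytes_py replknet_transfer_bytes_py_alt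
  simp [PySem.List.slice_to_neg_one, pvDTYPE_BYTES, List.foldl]
  ring
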